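-- pv_equiv track=rewrite | github.com/J-Schwenk/DS-1043_Labs | lab9.py | fuzzy_pick
-- ===== SOURCE A (Python) =====
-- def lowercase(word: str) -> str:
--     final_str = ""
--     lower_alph = "abcdefghijklmnopqrstuvwxyz"
--     upper_alph = "ABCDEFGHIJKLMNOPQRSTUVWXYZ"
--     for i in word:
--         if i in lower_alph:
--             final_str = final_str + i
--         else:
--             for n in range(0,26):
--                 if i == upper_alph[n]:
--                     final_str = final_str + lower_alph[n]
--     return(final_str)
--
-- def ngrams(word: str) -> list[str]:
--     """Returns a list of n-grams of word for all relevant n, in descending order of n."""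
--     ngram_list = []
--     word = lowercase(word)
--     length = len(word)
--     for n in range(length,0,-1):
--         for i in range(length-n+1):
--             ngram_list.append(word[i:i+n])
--     return ngram_list # [TODO] Replace this with the appropriate code
--
-- def fuzzy_pick(query: str, index: dict) -> dict[str,str]:
--     """Returns suggestions for valid options based on the query string.
--     Suggestions will take the form of a dictionary with suggestions as keys and longest matching ngram as the value"""
--     suggestions = {}
--     ngram = ngrams(query)
--     best_match = 0
--     for i in ngram:
--         try:
--             a = index[i]
--             length = len(i)
--             if length > best_match:
--                 suggestions = {}
--                 suggestions[i] = index[i]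
--                 best_match = length
--             elif length == best_match:
--                 suggestions[i] = index[i]
--         except: continue
--     return suggestions
-- ===== SOURCE B (Python) =====
-- _LO = "abcdefghijklmnopqrstuvwxyz"
-- _UP = "ABCDEFGHIJKLMNOPQRSTUVWXYZ"
--
--
-- def fuzzy_pick(query: str, index: dict) -> dict[str, str]:
--     """Suggestions = index keys that are longest substrings of the lowercased query,
--     ordered by their first occurrence position, mapped to their index values."""
--     q = "".join(_LO[_UP.index(c)] if c in _UP else c
--                 for c in query if c in _LO or c in _UP)
--     matches = {k: v for k, v in index.items() if k and k in q}
--     best = max(map(len, matches), default=0)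
--     return dict(sorted(((k, v) for k, v in matches.items() if len(k) == best),
--                        key=lambda kv: q.find(kv[0])))
-- ===== Notes on version B (the rewrite author's own statement) =====
-- stated objective: faster
-- what changed: Instead of enumerating all O(L^2) ngrams of the query and probing the index for each, B lowercases the query once, scans the index once keeping the non-empty keys that are substrings of it, takes the maximum matched key length, and returns those keys ordered by first occurrence position (q.find), which reproduces A's dict insertion order.
import Mathlib
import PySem

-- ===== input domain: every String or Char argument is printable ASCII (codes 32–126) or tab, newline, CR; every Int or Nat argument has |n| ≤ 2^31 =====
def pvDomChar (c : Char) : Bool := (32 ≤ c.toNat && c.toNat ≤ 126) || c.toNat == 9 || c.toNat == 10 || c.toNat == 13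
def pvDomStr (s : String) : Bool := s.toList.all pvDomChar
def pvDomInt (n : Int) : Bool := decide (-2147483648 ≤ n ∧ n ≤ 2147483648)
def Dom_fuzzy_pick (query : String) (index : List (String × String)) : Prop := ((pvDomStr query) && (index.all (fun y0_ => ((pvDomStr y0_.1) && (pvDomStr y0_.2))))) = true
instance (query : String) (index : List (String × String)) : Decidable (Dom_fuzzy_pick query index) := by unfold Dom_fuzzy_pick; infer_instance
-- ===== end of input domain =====

-- B re-implements fuzzy_pick by scanning the index once for substring keys instead of
-- enumerating all O(L^2) ngrams of the query; return values agree (dict-ordered) on all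
-- dict-representable inputs (association lists without duplicate keys).

-- the Python string constants, as char lists (iteration/indexing below is over chars)
def pvLowerAlph : List Char :=
  ['a','b','c','d','e','f','g','h','i','j','k','l','m','n','o','p','q','r','s','t','u','v','w','x','y','z']
def pvUpperAlph : List Char :=
  ['A','B','C','D','E','F','G','H','I','J','K','L','M','N','O','P','Q','R','S','T','U','V','W','X','Y','Z']

-- ===== PORT A =====
-- lowercase: the Python accumulates a str by `final_str + i`; ported exactly over List Char.
-- `i in lower_alph` for the single char i is membership; `i == upper_alph[n]` is char equality
-- (upper_alph[n] is in range for every n in range(0,26), so pyGetD's default is never used).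
def pvLowercase (word : List Char) : List Char :=
  word.foldl (fun acc i =>
    if pvLowerAlph.contains i then acc ++ [i]
    else (PySem.List.pyRange 0 26).foldl (fun acc2 n =>
      if i = PySem.List.pyGetD pvUpperAlph n ' ' then acc2 ++ [PySem.List.pyGetD pvLowerAlph n ' ']
      else acc2) acc) []

-- ngrams: two nested loops appending word[i:i+n]
def pvNgrams (word : String) : List String :=
  let w := pvLowercase word.toList
  let length : Int := (w.length : Int)
  (PySem.List.pyRange length 0 (-1)).foldl (fun ng n =>
    (PySem.List.pyRange 0 (length - n + 1)).foldl (fun ng2 i =>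
      ng2 ++ [String.ofList (PySem.List.slice w (some i) (some (i + n)))]) ng) []

-- fuzzy_pick: the try/except KeyError is the `match` on get?; `a = index[i]` and the later
-- `index[i]` are the same lookup value a.
def fuzzy_pick (query : String) (index : List (String × String)) : List (String × String) :=
  let d : PySem.Dict String String := PySem.Dict.mk index
  let r := (pvNgrams query).foldl (fun (st : PySem.Dict String String × Int) i =>
    match d.get? i with
    | none => st
    | some a =>
      let length := PySem.Str.len i
      if st.2 < length then (PySem.Dict.empty.insert i a, length)
      else if length = st.2 then (st.1.insert i a, st.2)
      else st) (PySem.Dict.empty, 0)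
  r.1.items

-- ===== PORT B =====
-- B's lowercase comprehension: keep alphabetic chars, translating uppercase via _UP.index;
-- `_UP.index(c)` is only evaluated when c ∈ _UP, so index? is always `some` there.
def pvLowerB (word : String) : String :=
  String.ofList ((word.toList.filter
      (fun c => pvLowerAlph.contains c || pvUpperAlph.contains c)).map
    (fun c => if pvUpperAlph.contains c then
        PySem.List.pyGetD pvLowerAlph (((PySem.List.index? pvUpperAlph c).getD 0 : Nat) : Int) ' '
      else c))

-- dict() applied to key-distinct pairs in order is those pairs; max(…, default=0) is maxD.
def fuzzy_pick_alt (query : String) (index : List (String × String)) : List (String × String) :=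
  let q := pvLowerB query
  let mtch : PySem.Dict String String := index.foldl
    (fun m kv => if kv.1 ≠ "" ∧ PySem.Str.isIn kv.1 q then m.insert kv.1 kv.2 else m)
    PySem.Dict.empty
  let best : Int := PySem.List.maxD (mtch.keys.map PySem.Str.len) (fun x => x) 0
  PySem.List.sorted (mtch.items.filter (fun kv => PySem.Str.len kv.1 = best))
    (fun kv => PySem.Str.find q kv.1)

-- ===== PRECONDITION & SPEC =====
-- Pre_ excludes association lists with duplicate keys: the Python argument is a dict, which
-- cannot hold duplicate keys, so such lists encode no actual Python input (the encoding's
-- value there is ambiguous: A reads the first binding, B's dict comprehension the last).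
def Pre_fuzzy_pick (query : String) (index : List (String × String)) : Prop :=
  (index.map Prod.fst).Nodup
instance (query : String) (index : List (String × String)) : Decidable (Pre_fuzzy_pick query index) := by unfold Pre_fuzzy_pick; infer_instance

def pvWitness_fuzzy_pick : String × (List (String × String)) :=
  ("The Cat!", [("ca", "cart"), ("x", "axe"), ("", "nil")])

def Spec_fuzzy_pick (query : String) (index : List (String × String)) (out : List (String × String)) : Prop := out = fuzzy_pick_alt query index
instance (query : String) (index : List (String × String)) (out : List (String × String)) : Decidable (Spec_fuzzy_pick query index out) := by unfold Spec_fuzzy_pick; infer_instance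

-- ===== CLAIM (what is proved, stated in full; the proofs are below) =====
def Claim_equal_fuzzy_pick : Prop := ∀ (query : String) (index : List (String × String)), Dom_fuzzy_pick query index → Pre_fuzzy_pick query index → Spec_fuzzy_pick query index (fuzzy_pick query index)

-- ===== LEMMAS AND PROOFS =====

-- ---- proof-only helpers ----

/-- One insertion step of A's loop for a matched ngram at the current best length. -/
def pvIns (d : PySem.Dict String String) (D : PySem.Dict String String) (k : String) :
    PySem.Dict String String :=
  match d.get? k with
  | none => D
  | some a => D.insert k a

/-- The body of A's suggestion loop, named. -/
def pvBody (d : PySem.Dict String String) (st : PySem.Dict String String × Int) (i : String) :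
    PySem.Dict String String × Int :=
  match d.get? i with
  | none => st
  | some a =>
    let length := PySem.Str.len i
    if st.2 < length then (PySem.Dict.empty.insert i a, length)
    else if length = st.2 then (st.1.insert i a, st.2)
    else st

/-- The length-n slice of w starting at i, as a String. -/
def pvSliceStr (w : List Char) (n : Nat) (i : Nat) : String :=
  String.ofList ((w.drop i).take n)

/-- The group of ngrams of length n (expects 1 ≤ n ≤ w.length). -/
def pvGrp (w : List Char) (n : Nat) : List String :=
  (List.range (w.length - n + 1)).map (pvSliceStr w n)

/-- Does some length-n ngram hit the index? -/
def pvHas (d : PySem.Dict String String) (w : List Char) (n : Nat) : Bool :=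
  (pvGrp w n).any (fun k => (d.get? k).isSome)

/-- Largest n ≤ m with a hit, else 0. -/
def pvBest (d : PySem.Dict String String) (w : List Char) : Nat → Nat
  | 0 => 0
  | m + 1 => if pvHas d w (m + 1) then m + 1 else pvBest d w m

/-- Lengths m, m-1, …, 1. -/
def pvDescN : Nat → List Nat
  | 0 => []
  | m + 1 => (m + 1) :: pvDescN m

-- ---- lowercase agreement ----

def pvCharMap (c : Char) : Char :=
  if pvUpperAlph.contains c then
    PySem.List.pyGetD pvLowerAlph (((PySem.List.index? pvUpperAlph c).getD 0 : Nat) : Int) ' '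
  else c

def pvCharOut (i : Char) : List Char :=
  if pvLowerAlph.contains i || pvUpperAlph.contains i then [pvCharMap i] else []

lemma pvInner_eq (i : Char) (acc : List Char) :
    (PySem.List.pyRange 0 26).foldl (fun acc2 n =>
      if i = PySem.List.pyGetD pvUpperAlph n ' ' then acc2 ++ [PySem.List.pyGetD pvLowerAlph n ' ']
      else acc2) acc
    = acc ++ (PySem.List.pyRange 0 26).flatMap (fun n =>
        if i = PySem.List.pyGetD pvUpperAlph n ' ' then [PySem.List.pyGetD pvLowerAlph n ' '] else []) := by
  have hb : (fun (acc2 : List Char) (n : Int) =>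
      if i = PySem.List.pyGetD pvUpperAlph n ' ' then acc2 ++ [PySem.List.pyGetD pvLowerAlph n ' ']
      else acc2)
      = (fun acc2 n => acc2 ++ (if i = PySem.List.pyGetD pvUpperAlph n ' '
          then [PySem.List.pyGetD pvLowerAlph n ' '] else [])) := by
    funext a n; split <;> simp
  rw [hb, PySem.List.foldl_append_eq_flatMap]

lemma pvLower_step (i : Char) (acc : List Char) :
    (if pvLowerAlph.contains i then acc ++ [i]
      else (PySem.List.pyRange 0 26).foldl (fun acc2 n =>
        if i = PySem.List.pyGetD pvUpperAlph n ' ' then acc2 ++ [PySem.List.pyGetD pvLowerAlph n ' ']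
        else acc2) acc)
    = acc ++ pvCharOut i := by
  by_cases hu : pvUpperAlph.contains i
  · have hmem : i ∈ pvUpperAlph := by simpa using hu
    fin_cases hmem <;> · rw [pvInner_eq, if_neg (by decide)]; exact congrArg (acc ++ ·) (by decide)
  · rw [pvInner_eq]
    have hflat : (PySem.List.pyRange 0 26).flatMap (fun n =>
        if i = PySem.List.pyGetD pvUpperAlph n ' ' then [PySem.List.pyGetD pvLowerAlph n ' '] else []) = [] := by
      apply List.flatMap_eq_nil_iff.mpr
      intro n hn
      rw [PySem.List.mem_pyRange_one] at hn
      have hm : PySem.List.pyGetD pvUpperAlph n ' ' ∈ pvUpperAlph := by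
        rw [PySem.List.pyGetD_eq_getElem pvUpperAlph ' ' hn.1 (by simpa [pvUpperAlph] using hn.2)]
        exact List.getElem_mem _
      have hne : i ≠ PySem.List.pyGetD pvUpperAlph n ' ' := by
        intro h; exact hu (by rw [h]; simpa using hm)
      simp [hne]
    rw [hflat]
    by_cases hl : pvLowerAlph.contains i <;>
      simp only [pvCharOut, pvCharMap, hl, hu, if_pos, if_neg, Bool.false_or, Bool.true_or,
        Bool.not_eq_true, List.append_nil]

lemma pvLowerB_toList (query : String) :
    (pvLowerB query).toList = pvLowercase query.toList := by
  rw [pvLowerB, pvLowercase, String.toList_ofList]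
  have h1 : ∀ (l : List Char) (acc : List Char),
      l.foldl (fun acc i =>
        if pvLowerAlph.contains i then acc ++ [i]
        else (PySem.List.pyRange 0 26).foldl (fun acc2 n =>
          if i = PySem.List.pyGetD pvUpperAlph n ' ' then acc2 ++ [PySem.List.pyGetD pvLowerAlph n ' ']
          else acc2) acc) acc = acc ++ l.flatMap pvCharOut := by
    intro l
    induction l with
    | nil => simp
    | cons c l ih => intro acc; rw [List.foldl_cons, pvLower_step, List.flatMap_cons, ih, List.append_assoc]
  rw [h1]
  have h2 : ∀ (l : List Char),
      (l.filter (fun c => pvLowerAlph.contains c || pvUpperAlph.contains c)).map pvCharMap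
        = l.flatMap pvCharOut := by
    intro l
    induction l with
    | nil => simp
    | cons c l ih =>
      rw [List.flatMap_cons, ← ih, List.filter_cons]
      by_cases h : (pvLowerAlph.contains c || pvUpperAlph.contains c : Bool)
      · rw [if_pos h, List.map_cons]
        show _ :: _ = pvCharOut c ++ _
        rw [pvCharOut, if_pos h]; rfl
      · rw [if_neg h]
        show _ = pvCharOut c ++ _
        rw [pvCharOut, if_neg h, List.nil_append]
  rw [show (fun c => if pvUpperAlph.contains c then
        PySem.List.pyGetD pvLowerAlph (((PySem.List.index? pvUpperAlph c).getD 0 : Nat) : Int) ' '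
      else c) = pvCharMap from rfl, h2, List.nil_append]

-- ---- slices and infixes ----

lemma pvMem_grp {w : List Char} {n : Nat} {k : String} (h1 : 1 ≤ n) (h2 : n ≤ w.length) :
    k ∈ pvGrp w n ↔ (k.toList <:+: w ∧ k.toList.length = n) := by
  simp only [pvGrp, pvSliceStr, List.mem_map, List.mem_range]
  constructor
  · rintro ⟨i, hi, rfl⟩
    rw [String.toList_ofList]
    have hlen : ((w.drop i).take n).length = n := by simp; omega
    refine ⟨?_, hlen⟩
    exact (List.take_prefix n (w.drop i)).isInfix.trans (List.drop_suffix i w).isInfix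
  · rintro ⟨⟨s, t, hst⟩, hlen⟩
    refine ⟨s.length, ?_, ?_⟩
    · have hw := congrArg List.length hst
      simp only [List.length_append] at hw
      omega
    · have hdrop : w.drop s.length = k.toList ++ t := by
        rw [← hst, List.append_assoc, List.drop_left]
      rw [hdrop, ← hlen, List.take_left, String.ofList_toList]

lemma pvGrp_len {w : List Char} {n : Nat} {k : String} (h1 : 1 ≤ n) (h2 : n ≤ w.length)
    (hk : k ∈ pvGrp w n) : PySem.Str.len k = (n : Int) := by
  rw [PySem.Str.len_eq, ((pvMem_grp h1 h2).mp hk).2]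

lemma mem_pvDescN {n m : Nat} : n ∈ pvDescN m ↔ 1 ≤ n ∧ n ≤ m := by
  induction m with
  | zero => simp [pvDescN]; omega
  | succ m ih => simp [pvDescN, ih]; omega

-- ---- the ngram list is the concatenation of the groups ----

lemma pvRange_desc (N : Nat) :
    PySem.List.pyRange (N : Int) 0 (-1) = (pvDescN N).map (Nat.cast : Nat → Int) := by
  have h0 : PySem.List.pyRange (N : Int) 0 (-1)
      = (List.range N).map (fun k : Nat => (N : Int) - (k : Int)) := by
    rw [PySem.List.pyRange]
    norm_num
    rcases Nat.eq_zero_or_pos N with h | h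
    · subst h; simp
    · rw [if_pos (by exact_mod_cast h)]
      apply List.map_congr_left
      intro k _
      ring
  have h1 : ∀ M : Nat, (List.range M).map (fun k : Nat => (M : Int) - (k : Int))
      = (pvDescN M).map (Nat.cast : Nat → Int) := by
    intro M
    induction M with
    | zero => simp [pvDescN]
    | succ M ih =>
      rw [List.range_succ_eq_map, List.map_cons, List.map_map,
        show pvDescN (M + 1) = (M + 1) :: pvDescN M from rfl, List.map_cons]
      congr 1
      rw [← ih]
      apply List.map_congr_left
      intro k hk
      simp only [Function.comp_apply, Nat.succ_eq_add_one]
      push_cast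
      ring
  rw [h0, h1]

lemma pvNgrams_eq (query : String) :
    pvNgrams query = (pvDescN (pvLowercase query.toList).length).flatMap
      (pvGrp (pvLowercase query.toList)) := by
  rw [pvNgrams]
  set w := pvLowercase query.toList with hw
  have main : ∀ (ms : List Nat) (acc : List String), (∀ n ∈ ms, 1 ≤ n ∧ n ≤ w.length) →
      (ms.map (Nat.cast : Nat → Int)).foldl (fun ng n =>
        (PySem.List.pyRange 0 ((w.length : Int) - n + 1)).foldl (fun ng2 i =>
          ng2 ++ [String.ofList (PySem.List.slice w (some i) (some (i + n)))]) ng) acc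
      = acc ++ ms.flatMap (pvGrp w) := by
    intro ms
    induction ms with
    | nil => simp
    | cons n ms ih =>
      intro acc hms
      have hn2 := (hms n (by simp)).2
      have hms' : ∀ m ∈ ms, 1 ≤ m ∧ m ≤ w.length := fun m hm => hms m (by simp [hm])
      rw [List.map_cons, List.foldl_cons]
      have hcast : (w.length : Int) - (n : Int) + 1 = ((w.length - n + 1 : Nat) : Int) := by
        push_cast [hn2]; ring
      have hinner : (PySem.List.pyRange 0 ((w.length : Int) - (n : Int) + 1)).foldl (fun ng2 i =>
          ng2 ++ [String.ofList (PySem.List.slice w (some i) (some (i + (n : Int))))]) acc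
          = acc ++ pvGrp w n := by
        rw [hcast, PySem.List.pyRange_zero_natCast, List.foldl_map]
        have hfun : (fun (x : List String) (y : Nat) =>
            x ++ [String.ofList (PySem.List.slice w (some (y : Int)) (some ((y : Int) + (n : Int))))])
            = (fun x y => x ++ [pvSliceStr w n y]) := by
          funext a i
          rw [PySem.List.slice_natCast_add]
          rfl
        rw [hfun, PySem.List.foldl_append_singleton_eq_map]
        rfl
      rw [hinner, ih (acc ++ pvGrp w n) hms', List.flatMap_cons, List.append_assoc]
  rw [pvRange_desc, main _ _ (fun n hn => mem_pvDescN.mp hn), List.nil_append]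

-- ---- group-fold lemmas ----

lemma pvFold_skip (d : PySem.Dict String String) (st : PySem.Dict String String × Int)
    (ks : List String) (h : ∀ k ∈ ks, PySem.Str.len k < st.2) :
    ks.foldl (pvBody d) st = st := by
  induction ks with
  | nil => rfl
  | cons k ks ih =>
    rw [List.foldl_cons]
    have hk := h k (by simp)
    have hstep : pvBody d st k = st := by
      rw [pvBody]
      cases hg : d.get? k with
      | none => rfl
      | some a => simp only []; rw [if_neg (by omega), if_neg (by omega)]
    rw [hstep]
    exact ih (fun k hk => h k (by simp [hk]))

lemma pvFold_eq (d : PySem.Dict String String) (D : PySem.Dict String String) (c : Int)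
    (ks : List String) (h : ∀ k ∈ ks, PySem.Str.len k = c) :
    ks.foldl (pvBody d) (D, c) = (ks.foldl (pvIns d) D, c) := by
  induction ks generalizing D with
  | nil => rfl
  | cons k ks ih =>
    rw [List.foldl_cons, List.foldl_cons]
    have hk := h k (by simp)
    have hstep : pvBody d (D, c) k = (pvIns d D k, c) := by
      rw [pvBody, pvIns]
      cases hg : d.get? k with
      | none => rfl
      | some a => simp only []; rw [if_neg (by omega), if_pos hk]
    rw [hstep]
    exact ih _ (fun k hk => h k (by simp [hk]))

lemma pvFold_fresh (d : PySem.Dict String String) (c : Int) (hc : 0 < c)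
    (ks : List String) (h : ∀ k ∈ ks, PySem.Str.len k = c) :
    ks.foldl (pvBody d) (PySem.Dict.empty, 0)
      = if ks.any (fun k => (d.get? k).isSome)
        then (ks.foldl (pvIns d) PySem.Dict.empty, c)
        else (PySem.Dict.empty, 0) := by
  induction ks with
  | nil => rfl
  | cons k ks ih =>
    have hk := h k (by simp)
    have h' : ∀ k ∈ ks, PySem.Str.len k = c := fun k hk => h k (by simp [hk])
    rw [List.foldl_cons, List.foldl_cons, List.any_cons]
    cases hg : d.get? k with
    | none =>
      have hstep : pvBody d (PySem.Dict.empty, 0) k = (PySem.Dict.empty, 0) := by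
        rw [pvBody, hg]
      have hstep' : pvIns d PySem.Dict.empty k = PySem.Dict.empty := by
        rw [pvIns, hg]
      rw [hstep, hstep', ih h']
      simp
    | some a =>
      have hstep : pvBody d (PySem.Dict.empty, 0) k = (PySem.Dict.empty.insert k a, c) := by
        rw [pvBody, hg]
        simp only []
        rw [if_pos (by omega), hk]
      have hstep' : pvIns d PySem.Dict.empty k = PySem.Dict.empty.insert k a := by
        rw [pvIns, hg]
      rw [hstep, hstep', pvFold_eq d _ c ks h']
      simp

-- ---- pvBest facts ----

lemma pvBest_le (d : PySem.Dict String String) (w : List Char) (m : Nat) :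
    pvBest d w m ≤ m := by
  induction m with
  | zero => simp [pvBest]
  | succ m ih => rw [pvBest]; split <;> omega

lemma pvBest_has (d : PySem.Dict String String) (w : List Char) (m : Nat)
    (h : pvBest d w m ≠ 0) : pvHas d w (pvBest d w m) = true := by
  induction m with
  | zero => simp [pvBest] at h
  | succ m ih =>
    rw [pvBest] at h ⊢
    split at h
    · rw [if_pos ‹_›]; assumption
    · rw [if_neg ‹_›]; exact ih h

lemma pvBest_ge (d : PySem.Dict String String) (w : List Char) (m n : Nat)
    (h1 : 1 ≤ n) (h2 : n ≤ m) (h3 : pvHas d w n = true) : n ≤ pvBest d w m := by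
  induction m with
  | zero => omega
  | succ m ih =>
    rw [pvBest]
    by_cases hif : pvHas d w (m + 1) = true
    · rw [if_pos hif]; omega
    · rw [if_neg hif]
      rcases Nat.lt_or_ge n (m + 1) with hlt | hge
      · exact ih (by omega)
      · exfalso
        have hnm : n = m + 1 := by omega
        subst hnm
        exact hif h3

-- ---- the outer fold over descending lengths ----

lemma pvFoldA (d : PySem.Dict String String) (w : List Char) (m : Nat) (hm : m ≤ w.length) :
    ((pvDescN m).flatMap (pvGrp w)).foldl (pvBody d) (PySem.Dict.empty, 0)
      = if pvBest d w m = 0 then (PySem.Dict.empty, 0)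
        else ((pvGrp w (pvBest d w m)).foldl (pvIns d) PySem.Dict.empty,
              ((pvBest d w m : Nat) : Int)) := by
  induction m with
  | zero => simp [pvDescN, pvBest]
  | succ m ih =>
    rw [pvDescN, List.flatMap_cons, List.foldl_append]
    have hlen : ∀ k ∈ pvGrp w (m + 1), PySem.Str.len k = ((m + 1 : Nat) : Int) :=
      fun k hk => pvGrp_len (by omega) hm hk
    rw [pvFold_fresh d _ (by positivity) _ hlen]
    by_cases hh : pvHas d w (m + 1)
    · rw [if_pos (by simpa [pvHas] using hh)]
      have hskip : ∀ k ∈ (pvDescN m).flatMap (pvGrp w), PySem.Str.len k < ((m + 1 : Nat) : Int) := by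
        intro k hk
        rw [List.mem_flatMap] at hk
        obtain ⟨n, hn, hkn⟩ := hk
        obtain ⟨hn1, hn2⟩ := mem_pvDescN.mp hn
        rw [pvGrp_len hn1 (by omega) hkn]
        exact_mod_cast Nat.lt_succ_of_le hn2
      rw [pvFold_skip d _ _ hskip, pvBest, if_pos hh, if_neg (by omega)]
    · rw [if_neg (by simpa [pvHas] using hh), ih (by omega), pvBest, if_neg hh]

-- ---- the group-L insertion fold: items, nodup, order ----

lemma pvInsInv (d : PySem.Dict String String) (w : List Char) (L : Nat)
    (hL1 : 1 ≤ L) (hLN : L ≤ w.length) (T : Nat) (hT : T ≤ w.length - L + 1) :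
    (((List.range T).map (pvSliceStr w L)).foldl (pvIns d) PySem.Dict.empty).keys.Nodup
    ∧ (∀ p ∈ (((List.range T).map (pvSliceStr w L)).foldl (pvIns d) PySem.Dict.empty).items,
        d.get? p.1 = some p.2 ∧ ∃ i < T, p.1 = pvSliceStr w L i)
    ∧ (∀ i < T, (d.get? (pvSliceStr w L i)).isSome →
        pvSliceStr w L i ∈ (((List.range T).map (pvSliceStr w L)).foldl (pvIns d) PySem.Dict.empty).keys)
    ∧ (∀ p ∈ (((List.range T).map (pvSliceStr w L)).foldl (pvIns d) PySem.Dict.empty).items,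
        0 ≤ PySem.Chars.find w p.1.toList
        ∧ (PySem.Chars.find w p.1.toList).toNat < T)
    ∧ (((List.range T).map (pvSliceStr w L)).foldl (pvIns d) PySem.Dict.empty).items.Pairwise
        (fun a b => PySem.Chars.find w a.1.toList < PySem.Chars.find w b.1.toList) := by
  induction T with
  | zero =>
    simp only [List.range_zero, List.map_nil, List.foldl_nil]
    exact ⟨PySem.Dict.nodup_keys_empty, by simp [PySem.Dict.empty], by omega,
      by simp [PySem.Dict.empty], by simp [PySem.Dict.empty]⟩
  | succ T ih =>
    have hT' : T ≤ w.length - L + 1 := by omega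
    have hTL : T + L ≤ w.length := by omega
    obtain ⟨h1, h2, h3, h4, h5⟩ := ih hT'
    set k := pvSliceStr w L T with hk
    have hktl : k.toList = (w.drop T).take L := by rw [hk, pvSliceStr, String.toList_ofList]
    have hklen : k.toList.length = L := by rw [hktl]; simp; omega
    set G := ((List.range T).map (pvSliceStr w L)).foldl (pvIns d) PySem.Dict.empty with hG
    have hstep : ((List.range (T + 1)).map (pvSliceStr w L)).foldl (pvIns d) PySem.Dict.empty
        = pvIns d G k := by
      rw [List.range_succ, List.map_append, List.foldl_append]
      rfl
    rw [hstep]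
    cases hg : d.get? k with
    | none =>
      have hins : pvIns d G k = G := by rw [pvIns, hg]
      rw [hins]
      refine ⟨h1, ?_, ?_, ?_, h5⟩
      · intro p hp
        obtain ⟨hv, i, hi, hpi⟩ := h2 p hp
        exact ⟨hv, i, by omega, hpi⟩
      · intro i hi hs
        rcases Nat.lt_or_ge i T with hlt | hge
        · exact h3 i hlt hs
        · have hiT : i = T := by omega
          subst hiT
          rw [← hk, hg] at hs
          simp at hs
      · intro p hp
        obtain ⟨ha, hb⟩ := h4 p hp
        exact ⟨ha, by omega⟩
    | some a =>
      have hins : pvIns d G k = G.insert k a := by rw [pvIns, hg]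
      rw [hins]
      by_cases hmem : k ∈ G.keys
      · have hcont : G.contains k = true := (PySem.Dict.contains_iff_mem_keys G k).mpr hmem
        have hitems : (G.insert k a).items = G.items := by
          rw [PySem.Dict.items_insert_of_contains G a hcont]
          have : ∀ p ∈ G.items, (if (p.1 == k) = true then (k, a) else p) = p := by
            intro p hp
            by_cases hpk : p.1 = k
            · rw [if_pos (by simpa using hpk)]
              have hv := (h2 p hp).1
              rw [hpk, hg] at hv
              have : a = p.2 := by injection hv
              rw [← hpk, this]
            · rw [if_neg (by simpa using hpk)]
          simpa using List.map_congr_left this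
        have hkeys : (G.insert k a).keys = G.keys := by
          rw [PySem.Dict.keys, hitems, ← PySem.Dict.keys]
        rw [hitems, hkeys]
        refine ⟨h1, ?_, ?_, ?_, h5⟩
        · intro p hp
          obtain ⟨hv, i, hi, hpi⟩ := h2 p hp
          exact ⟨hv, i, by omega, hpi⟩
        · intro i hi hs
          rcases Nat.lt_or_ge i T with hlt | hge
          · exact h3 i hlt hs
          · have hiT : i = T := by omega
            subst hiT
            exact hmem
        · intro p hp
          obtain ⟨ha', hb'⟩ := h4 p hp
          exact ⟨ha', by omega⟩
      · -- fresh key appended: its first occurrence in w is exactly T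
        have hocc : k.toList <+: w.drop T := hktl ▸ List.take_prefix L (w.drop T)
        have hinf : k.toList <:+: w := hocc.isInfix.trans (List.drop_suffix T w).isInfix
        have h0f : 0 ≤ PySem.Chars.find w k.toList :=
          (PySem.Chars.find_nonneg_iff w k.toList).mpr hinf
        obtain ⟨hpre, hmin⟩ := PySem.Chars.find_spec h0f
        have hle : (PySem.Chars.find w k.toList).toNat ≤ T := by
          by_contra h'
          exact hmin T (by omega) hocc
        have hfind : PySem.Chars.find w k.toList = (T : Int) := by
          rcases Nat.lt_or_ge (PySem.Chars.find w k.toList).toNat T with hlt | hge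
          · exfalso
            have h' : k.toList = (w.drop (PySem.Chars.find w k.toList).toNat).take L := by
              have := List.prefix_iff_eq_take.mp hpre
              rw [hklen] at this
              exact this
            have heqk : k = pvSliceStr w L (PySem.Chars.find w k.toList).toNat :=
              (String.ofList_toList (s := k)).symm.trans (congrArg String.ofList h')
            have hs : (d.get? (pvSliceStr w L (PySem.Chars.find w k.toList).toNat)).isSome := by
              rw [← heqk, hg]; rfl
            exact hmem (heqk ▸ h3 _ hlt hs)
          · omega
        have hcont : G.contains k = false := by
          rcases Bool.eq_false_or_eq_true (G.contains k) with h | h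
          · exact absurd ((PySem.Dict.contains_iff_mem_keys G k).mp h) hmem
          · exact h
        have hitems : (G.insert k a).items = G.items ++ [(k, a)] :=
          PySem.Dict.items_insert_of_not_contains G a hcont
        have hkeys : (G.insert k a).keys = G.keys ++ [k] := by
          rw [PySem.Dict.keys, hitems, List.map_append, ← PySem.Dict.keys]
          rfl
        refine ⟨?_, ?_, ?_, ?_, ?_⟩
        · rw [hkeys]
          simp only [List.nodup_append, List.nodup_cons]
          refine ⟨h1, by simp, ?_⟩
          intro x hx b hb heq
          have hbk : b = k := by simpa using hb
          exact hmem (hbk ▸ heq ▸ hx)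
        · intro p hp
          rw [hitems, List.mem_append] at hp
          rcases hp with hp | hp
          · obtain ⟨hv, i, hi, hpi⟩ := h2 p hp
            exact ⟨hv, i, by omega, hpi⟩
          · have hpk : p = (k, a) := by simpa using hp
            subst hpk
            exact ⟨hg, T, by omega, rfl⟩
        · intro i hi hs
          rw [hkeys, List.mem_append]
          rcases Nat.lt_or_ge i T with hlt | hge
          · exact Or.inl (h3 i hlt hs)
          · have hiT : i = T := by omega
            subst hiT
            exact Or.inr (by simp only [List.mem_singleton]; exact hk.symm)
        · intro p hp
          rw [hitems, List.mem_append] at hp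
          rcases hp with hp | hp
          · obtain ⟨ha', hb'⟩ := h4 p hp
            exact ⟨ha', by omega⟩
          · have hpk : p = (k, a) := by simpa using hp
            subst hpk
            simp only []
            rw [hfind]
            omega
        · rw [hitems, List.pairwise_append]
          refine ⟨h5, by simp, ?_⟩
          intro x hx y hy
          have hyk : y = (k, a) := by simpa using hy
          subst hyk
          obtain ⟨hx0, hxT⟩ := h4 x hx
          simp only []
          rw [hfind]
          omega

-- ---- B's matches dict ----

lemma pvMatchesAux (q : String) (l : List (String × String)) :
    ∀ (m0 : PySem.Dict String String), m0.keys.Nodup → (∀ p ∈ l, p.1 ∉ m0.keys) →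
    (l.map Prod.fst).Nodup →
    (l.foldl (fun m kv => if kv.1 ≠ "" ∧ PySem.Str.isIn kv.1 q then m.insert kv.1 kv.2 else m)
        m0).items
      = m0.items ++ l.filter (fun kv => decide (kv.1 ≠ "" ∧ PySem.Str.isIn kv.1 q)) := by
  induction l with
  | nil => intro m0 _ _ _; simp
  | cons kv l ih =>
    intro m0 hnd hdisj hlnd
    rw [List.foldl_cons, List.filter_cons]
    by_cases hc : (kv.1 ≠ "" ∧ PySem.Str.isIn kv.1 q)
    · rw [if_pos hc, if_pos (by simpa using hc)]
      have hcont : m0.contains kv.1 = false := by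
        rcases Bool.eq_false_or_eq_true (m0.contains kv.1) with h | h
        · exact absurd ((PySem.Dict.contains_iff_mem_keys m0 kv.1).mp h)
            (hdisj kv (by simp))
        · exact h
      have hitems : (m0.insert kv.1 kv.2).items = m0.items ++ [kv] := by
        rw [PySem.Dict.items_insert_of_not_contains m0 kv.2 hcont]
      have hkeys : (m0.insert kv.1 kv.2).keys = m0.keys ++ [kv.1] := by
        rw [PySem.Dict.keys, hitems, List.map_append, ← PySem.Dict.keys]
        rfl
      rw [ih (m0.insert kv.1 kv.2) ?_ ?_ (by simpa using hlnd.of_cons), hitems]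
      · simp
      · rw [hkeys]
        simp only [List.nodup_append, List.nodup_cons]
        refine ⟨hnd, by simp, ?_⟩
        intro a ha b hb heq
        have hbk : b = kv.1 := by simpa using hb
        exact hdisj kv (by simp) (hbk ▸ heq ▸ ha)
      · intro p hp
        rw [hkeys]
        simp only [List.mem_append, List.mem_singleton]
        rintro (h | h)
        · exact hdisj p (by simp [hp]) h
        · have : kv.1 ∈ l.map Prod.fst := List.mem_map.mpr ⟨p, hp, h⟩
          rw [List.map_cons, List.nodup_cons] at hlnd
          exact hlnd.1 this
    · rw [if_neg hc, if_neg (by simpa using hc)]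
      exact ih m0 hnd (fun p hp => hdisj p (by simp [hp])) (by simpa using hlnd.of_cons)

lemma pvMatches_items (q : String) (index : List (String × String))
    (h : (index.map Prod.fst).Nodup) :
    (index.foldl
      (fun m kv => if kv.1 ≠ "" ∧ PySem.Str.isIn kv.1 q then m.insert kv.1 kv.2 else m)
      PySem.Dict.empty).items
    = index.filter (fun kv => decide (kv.1 ≠ "" ∧ PySem.Str.isIn kv.1 q)) := by
  rw [pvMatchesAux q index PySem.Dict.empty PySem.Dict.nodup_keys_empty (by simp [PySem.Dict.keys_empty]) h]
  rfl

-- ---- assembly helpers ----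

lemma pvKeys_mem {κ ν : Type} [BEq κ] (G : PySem.Dict κ ν) (k : κ) :
    k ∈ G.keys ↔ ∃ v, (k, v) ∈ G.items := by
  rw [PySem.Dict.keys]
  constructor
  · intro h
    obtain ⟨p, hp, hpk⟩ := List.mem_map.mp h
    exact ⟨p.2, by rw [← hpk]; exact hp⟩
  · rintro ⟨v, hv⟩
    exact List.mem_map.mpr ⟨(k, v), hv, rfl⟩

lemma pvMain (query : String) (index : List (String × String))
    (hpre : (index.map Prod.fst).Nodup) :
    fuzzy_pick query index = fuzzy_pick_alt query index := by
  set d : PySem.Dict String String := PySem.Dict.mk index with hd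
  set w : List Char := pvLowercase query.toList with hw
  set q : String := pvLowerB query with hq
  have hql : q.toList = w := pvLowerB_toList query
  have hdnodup : d.keys.Nodup := hpre
  have hitems_d : d.items = index := rfl
  have hget : ∀ (k : String) (v : String), d.get? k = some v ↔ (k, v) ∈ index :=
    fun k v => PySem.Dict.get?_eq_some_iff_mem_items d k v hdnodup
  -- the A side, reduced
  have hA : fuzzy_pick query index
      = (((pvDescN w.length).flatMap (pvGrp w)).foldl (pvBody d) (PySem.Dict.empty, 0)).1.items := by
    rw [show fuzzy_pick query index
        = ((pvNgrams query).foldl (pvBody d) (PySem.Dict.empty, 0)).1.items from rfl,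
      pvNgrams_eq]
  rw [hA, pvFoldA d w w.length le_rfl]
  -- the B side, reduced
  have hMi : (index.foldl
      (fun m kv => if kv.1 ≠ "" ∧ PySem.Str.isIn kv.1 q then m.insert kv.1 kv.2 else m)
      PySem.Dict.empty).items
      = index.filter (fun kv => decide (kv.1 ≠ "" ∧ PySem.Str.isIn kv.1 q)) :=
    pvMatches_items q index hpre
  set Mi := index.filter (fun kv => decide (kv.1 ≠ "" ∧ PySem.Str.isIn kv.1 q)) with hMidef
  have hB : fuzzy_pick_alt query index
      = PySem.List.sorted (Mi.filter (fun kv => PySem.Str.len kv.1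
            = PySem.List.maxD (Mi.map (fun p => PySem.Str.len p.1)) (fun x => x) 0))
          (fun kv => PySem.Str.find q kv.1) := by
    rw [show fuzzy_pick_alt query index
        = PySem.List.sorted (((index.foldl
            (fun m kv => if kv.1 ≠ "" ∧ PySem.Str.isIn kv.1 q then m.insert kv.1 kv.2 else m)
            PySem.Dict.empty).items).filter (fun kv => PySem.Str.len kv.1
              = PySem.List.maxD (((index.foldl
                (fun m kv => if kv.1 ≠ "" ∧ PySem.Str.isIn kv.1 q then m.insert kv.1 kv.2 else m)
                PySem.Dict.empty).keys).map PySem.Str.len) (fun x => x) 0))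
          (fun kv => PySem.Str.find q kv.1) from rfl]
    rw [show ((index.foldl
        (fun m kv => if kv.1 ≠ "" ∧ PySem.Str.isIn kv.1 q then m.insert kv.1 kv.2 else m)
        PySem.Dict.empty).keys) = ((index.foldl
        (fun m kv => if kv.1 ≠ "" ∧ PySem.Str.isIn kv.1 q then m.insert kv.1 kv.2 else m)
        PySem.Dict.empty).items).map Prod.fst from rfl, hMi, List.map_map]
    rfl
  rw [hB]
  -- membership bridge for Mi
  have hMimem : ∀ p : String × String, p ∈ Mi ↔
      (p ∈ index ∧ p.1.toList ≠ [] ∧ p.1.toList <:+: w) := by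
    intro p
    rw [hMidef, List.mem_filter]
    constructor
    · rintro ⟨h1, h2⟩
      obtain ⟨hne, hin⟩ := of_decide_eq_true h2
      refine ⟨h1, ?_, ?_⟩
      · intro h; exact hne (String.toList_eq_nil_iff.mp h)
      · have := (PySem.Str.isIn_iff_infix p.1 q).mp hin
        rwa [hql] at this
    · rintro ⟨h1, h2, h3⟩
      refine ⟨h1, decide_eq_true ⟨?_, ?_⟩⟩
      · intro h; exact h2 (by rw [h]; rfl)
      · exact (PySem.Str.isIn_iff_infix p.1 q).mpr (by rwa [hql])
  -- pvHas in terms of index entries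
  have hhas : ∀ n : Nat, 1 ≤ n → n ≤ w.length →
      (pvHas d w n = true ↔ ∃ p ∈ Mi, p.1.toList.length = n) := by
    intro n h1 h2
    rw [pvHas, List.any_eq_true]
    constructor
    · rintro ⟨k, hk, hs⟩
      obtain ⟨v, hv⟩ := Option.isSome_iff_exists.mp hs
      obtain ⟨hinf, hlen⟩ := (pvMem_grp h1 h2).mp hk
      refine ⟨(k, v), (hMimem (k, v)).mpr ⟨(hget k v).mp hv, ?_, hinf⟩, hlen⟩
      intro h; rw [h] at hlen; simp at hlen; omega
    · rintro ⟨p, hp, hlen⟩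
      obtain ⟨h1', h2', h3'⟩ := (hMimem p).mp hp
      refine ⟨p.1, (pvMem_grp h1 h2).mpr ⟨h3', hlen⟩, ?_⟩
      rw [(hget p.1 p.2).mpr h1']
      rfl
  set L := pvBest d w w.length with hL
  by_cases hL0 : L = 0
  · -- no key matches: both sides are []
    rw [if_pos hL0]
    have hMinil : Mi = [] := by
      rcases hMieq : Mi with _ | ⟨p, rest⟩
      · rfl
      · exfalso
        have hp : p ∈ Mi := by rw [hMieq]; simp
        obtain ⟨h1', h2', h3'⟩ := (hMimem p).mp hp
        have hn1 : 1 ≤ p.1.toList.length := by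
          rcases hptl : p.1.toList with _ | ⟨c, cs⟩
          · exact absurd hptl h2'
          · simp
        have hn2 : p.1.toList.length ≤ w.length := h3'.length_le
        have := pvBest_ge d w w.length p.1.toList.length hn1 hn2
          ((hhas _ hn1 hn2).mpr ⟨p, hp, rfl⟩)
        omega
    rw [hMinil]
    rfl
  · rw [if_neg hL0]
    have hL1 : 1 ≤ L := by omega
    have hLN : L ≤ w.length := pvBest_le d w w.length
    obtain ⟨g1, g2, g3, g4, g5⟩ := pvInsInv d w L hL1 hLN (w.length - L + 1) le_rfl
    have hGdef : pvGrp w L = (List.range (w.length - L + 1)).map (pvSliceStr w L) := rfl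
    set G := ((List.range (w.length - L + 1)).map (pvSliceStr w L)).foldl (pvIns d) PySem.Dict.empty with hG
    rw [hGdef, ← hG]
    -- characterize G's items
    have hGmem : ∀ p : String × String, p ∈ G.items ↔
        (d.get? p.1 = some p.2 ∧ p.1 ∈ pvGrp w L) := by
      intro p
      constructor
      · intro hp
        obtain ⟨hv, i, hi, hpi⟩ := g2 p hp
        exact ⟨hv, hGdef ▸ List.mem_map.mpr ⟨i, List.mem_range.mpr hi, hpi.symm⟩⟩
      · rintro ⟨hv, hgrp⟩
        obtain ⟨i, hi, hpi⟩ := List.mem_map.mp (hGdef ▸ hgrp)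
        have hs : (d.get? (pvSliceStr w L i)).isSome := by rw [hpi, hv]; rfl
        have hk := g3 i (List.mem_range.mp hi) hs
        rw [hpi] at hk
        obtain ⟨v, hv'⟩ := (pvKeys_mem G p.1).mp hk
        have := (g2 (p.1, v) hv').1
        rw [hv] at this
        have hveq : v = p.2 := by injection this.symm
        rwa [hveq] at hv'
    -- best = L
    have hbest : PySem.List.maxD (Mi.map (fun p => PySem.Str.len p.1)) (fun x => x) 0
        = (L : Int) := by
      obtain ⟨p0, hp0, hp0len⟩ := (hhas L hL1 hLN).mp (pvBest_has d w w.length hL0)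
      have hne : Mi.map (fun p => PySem.Str.len p.1) ≠ [] := by
        intro h
        exact absurd (h ▸ List.mem_map.mpr ⟨p0, hp0, rfl⟩) (List.not_mem_nil)
      have hmax := PySem.List.max?_eq_some_maxD (Mi.map (fun p => PySem.Str.len p.1))
        (fun x => x) 0 hne
      have hmem := PySem.List.max?_mem hmax
      have hisMax := PySem.List.max?_isMax hmax
      apply le_antisymm
      · obtain ⟨p, hp, hplen⟩ := List.mem_map.mp hmem
        obtain ⟨h1', h2', h3'⟩ := (hMimem p).mp hp
        have hn1 : 1 ≤ p.1.toList.length := by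
          rcases hptl : p.1.toList with _ | ⟨c, cs⟩
          · exact absurd hptl h2'
          · simp
        have hn2 : p.1.toList.length ≤ w.length := h3'.length_le
        have hb := pvBest_ge d w w.length p.1.toList.length hn1 hn2
          ((hhas _ hn1 hn2).mpr ⟨p, hp, rfl⟩)
        rw [← hplen, PySem.Str.len_eq]
        exact_mod_cast hb
      · have hLmem : (L : Int) ∈ Mi.map (fun p => PySem.Str.len p.1) :=
          List.mem_map.mpr ⟨p0, hp0, by rw [PySem.Str.len_eq, hp0len]⟩
        exact hisMax _ hLmem
    rw [hbest]
    -- sorted(filter) = G.items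
    have hGnodup : G.items.Nodup := List.Nodup.of_map Prod.fst g1
    have hFnodup : (Mi.filter (fun kv => PySem.Str.len kv.1 = (L : Int))).Nodup := by
      have hidx : index.Nodup := List.Nodup.of_map Prod.fst hpre
      exact (List.filter_sublist.trans (hMidef ▸ List.filter_sublist)).nodup hidx
    refine Eq.symm (PySem.List.sorted_eq_of_perm_of_pairwise_lt _ G.items _ ?_ ?_)
    · rw [List.perm_ext_iff_of_nodup hGnodup hFnodup]
      intro p
      rw [hGmem p, List.mem_filter, hMimem p]
      constructor
      · rintro ⟨hv, hgrp⟩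
        obtain ⟨hinf, hlen⟩ := (pvMem_grp hL1 hLN).mp hgrp
        refine ⟨⟨(hget p.1 p.2).mp hv, ?_, hinf⟩, ?_⟩
        · intro h; rw [h] at hlen; simp at hlen; omega
        · rw [decide_eq_true_eq, PySem.Str.len_eq, hlen]
      · rintro ⟨⟨h1', h2', h3'⟩, hlen⟩
        rw [decide_eq_true_eq, PySem.Str.len_eq] at hlen
        have hlen' : p.1.toList.length = L := by exact_mod_cast hlen
        exact ⟨(hget p.1 p.2).mpr h1', (pvMem_grp hL1 hLN).mpr ⟨h3', hlen'⟩⟩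
    · apply g5.imp
      intro a b hab
      show PySem.Str.find q a.1 < PySem.Str.find q b.1
      have ha : PySem.Str.find q a.1 = PySem.Chars.find w a.1.toList := by
        rw [show PySem.Str.find q a.1 = PySem.Chars.find q.toList a.1.toList from rfl, hql]
      have hb : PySem.Str.find q b.1 = PySem.Chars.find w b.1.toList := by
        rw [show PySem.Str.find q b.1 = PySem.Chars.find q.toList b.1.toList from rfl, hql]
      rw [ha, hb]
      exact hab

-- ===== VERDICT (by name: the statement is the Claim_ definition above) =====
theorem fuzzy_pick_spec : Claim_equal_fuzzy_pick := by
  intro query index _ hpre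
  exact pvMain query index hpre
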